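-- pv_equiv track=rewrite | github.com/JakubKazimierski/PythonPortfolio | Medium/ArrayAddition/ArrayAddition.py | ArrayAddition
-- ===== SOURCE A (Python) =====
-- from itertools import combinations, chain
--
-- def ArrayAddition(arr):
--     '''
--     Have the function ArrayAddition(arr)
--     take the array of numbers stored in arr
--     and return the string true if any combination
--     of numbers in the array (excluding the largest number)
--     can be added up to equal the largest number in the array,
--     otherwise return the string false.
--
--     For example: if arr contains [4, 6, 23, 10, 1, 3] the output
--     should return true because 4 + 6 + 10 + 3 = 23. The array will
--     not be empty, will not contain all the same elements, and may
--     contain negative numbers.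
--     '''
--
--     max_num = max(arr)
--
--     arr.pop(arr.index(max_num))
--
--     # below chains all combinations into one iterable
--     combinations_list = chain(*map(lambda x: combinations(arr, x), range(1, len(arr)+1)))
--
--     for combination in combinations_list:
--         if sum(combination) == max_num:
--             return "true"
--
--     return "false"
-- ===== SOURCE B (Python) =====
-- def ArrayAddition(arr):
--     # Bitset subset-sum DP: bit i of mask says some non-empty subset of the
--     # processed elements sums to i + base (base = sum of processed negatives).
--     # Elements are processed smallest-|x| first and we stop as soon as the
--     # target bit appears. Like A, removes the first occurrence of the max
--     # from arr in place.
--     max_num = max(arr)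
--     arr.pop(arr.index(max_num))
--     mask = 0
--     base = 0
--     for x in sorted(arr, key=abs):
--         if x >= 0:
--             mask |= mask << x
--             mask |= 1 << (x - base)
--         else:
--             mask |= mask << (-x)
--             mask |= 1 << (-base)   # the singleton {x}: x - (base + x) = -base
--             base += x
--         if max_num >= base and (mask >> (max_num - base)) & 1:
--             return "true"
--     return "false"
-- ===== Notes on version B (the rewrite author's own statement) =====
-- stated objective: faster
-- what changed: Replaces exhaustive lazy enumeration of all combinations with a bitset subset-sum DP (reachable-sum bitmask, smallest-magnitude elements first, early exit on the target bit).
-- outside the precondition, e.g. on ArrayAddition([]): A raises ValueError, B raises ValueError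
import Mathlib
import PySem

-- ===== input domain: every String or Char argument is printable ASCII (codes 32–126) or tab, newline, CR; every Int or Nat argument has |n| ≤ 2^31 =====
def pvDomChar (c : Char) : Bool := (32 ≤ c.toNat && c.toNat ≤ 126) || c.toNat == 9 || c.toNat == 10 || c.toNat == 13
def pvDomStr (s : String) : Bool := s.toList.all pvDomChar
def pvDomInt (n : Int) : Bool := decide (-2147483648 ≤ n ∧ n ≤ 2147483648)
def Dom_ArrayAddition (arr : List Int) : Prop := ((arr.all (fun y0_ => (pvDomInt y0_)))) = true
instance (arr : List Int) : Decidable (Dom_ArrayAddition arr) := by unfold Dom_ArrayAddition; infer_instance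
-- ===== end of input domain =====

-- B replaces A's exhaustive lazy enumeration of all combinations by a bitset subset-sum DP
-- (a bitmask of reachable non-empty subset sums, smallest-|x| elements first, early exit).
-- Both A and B mutate the Python argument in place (pop of the first max); the
-- equivalence proved here is about the return value only.

-- ===== PORT A =====
-- itertools.combinations(xs, k): all length-k subsequences, in itertools' order
def pvCombos : List Int → Nat → List (List Int)
  | _, 0 => [[]]
  | [], _ + 1 => []
  | x :: xs, k + 1 => (pvCombos xs k).map (x :: ·) ++ pvCombos xs (k + 1)

def ArrayAddition (arr : List Int) : String :=
  match PySem.List.max? arr (fun y => y) with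
  | none => "false"   -- unreachable under Pre_: Python's max([]) raises ValueError
  | some m =>
    -- arr.pop(arr.index(max_num)); the option fallbacks are unreachable (m ∈ arr)
    let rest : List Int :=
      match PySem.List.index? arr m with
      | none => arr
      | some i =>
        match PySem.List.pop? arr (i : Int) with
        | none => arr
        | some (_, r) => r
    let combinations_list :=
      (PySem.List.pyRange 1 ((rest.length : Int) + 1) 1).flatMap
        (fun k => pvCombos rest k.toNat)
    -- 'for combination …: if sum == max: return "true"' / 'return "false"'
    if combinations_list.any (fun c => c.sum == m) then "true" else "false"

-- ===== PORT B =====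
-- Source B's loop-body state update: the mask/base assignments for one element x
def pvStep (mask : Nat) (base : Int) (x : Int) : Nat × Int :=
  if 0 ≤ x then ((mask ||| (mask <<< x.toNat)) ||| (1 <<< (x - base).toNat), base)
  else ((mask ||| (mask <<< (-x).toNat)) ||| (1 <<< (-base).toNat), base + x)

-- Source B's loop: bit i of mask ⟺ some non-empty subset of the processed elements
-- sums to i + base; early return "true" when the target bit appears
def pvLoop (m : Int) : List Int → Nat → Int → String
  | [], _, _ => "false"
  | x :: xs, mask, base =>
    if m ≥ (pvStep mask base x).2 ∧
        (((pvStep mask base x).1 >>> (m - (pvStep mask base x).2).toNat) &&& 1) = 1 then "true"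
    else pvLoop m xs (pvStep mask base x).1 (pvStep mask base x).2

def ArrayAddition_alt (arr : List Int) : String :=
  match PySem.List.max? arr (fun y => y) with
  | none => "false"   -- unreachable under Pre_: Python's max([]) raises ValueError
  | some m =>
    let rest : List Int :=
      match PySem.List.index? arr m with
      | none => arr
      | some i =>
        match PySem.List.pop? arr (i : Int) with
        | none => arr
        | some (_, r) => r
    pvLoop m (PySem.List.sorted rest (fun x => |x|) false) 0 0

-- ===== PRECONDITION & SPEC =====
-- Pre_ excludes only the empty list, on which Python's max(arr) raises ValueError.
def Pre_ArrayAddition (arr : List Int) : Prop := arr ≠ []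
instance (arr : List Int) : Decidable (Pre_ArrayAddition arr) := by
  unfold Pre_ArrayAddition; infer_instance

def pvWitness_ArrayAddition : List Int := [4, 6, 23, 10, 1, 3]

def Spec_ArrayAddition (arr : List Int) (out : String) : Prop := out = ArrayAddition_alt arr
instance (arr : List Int) (out : String) : Decidable (Spec_ArrayAddition arr out) := by
  unfold Spec_ArrayAddition; infer_instance

-- ===== CLAIM (what is proved, stated in full; the proofs are below) =====
def Claim_equal_ArrayAddition : Prop := ∀ (arr : List Int), Dom_ArrayAddition arr → Pre_ArrayAddition arr → Spec_ArrayAddition arr (ArrayAddition arr)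

-- ===== LEMMAS AND PROOFS =====

-- c appears in combinations(xs, k) iff c is a length-k subsequence of xs
theorem mem_pvCombos (xs : List Int) : ∀ (k : Nat) (c : List Int),
    c ∈ pvCombos xs k ↔ c.Sublist xs ∧ c.length = k := by
  induction xs with
  | nil =>
    intro k c
    cases k with
    | zero => simp [pvCombos, List.sublist_nil]
    | succ k =>
      simp only [pvCombos, List.not_mem_nil, false_iff]
      rintro ⟨hs, hl⟩
      simp [List.sublist_nil] at hs
      simp [hs] at hl
  | cons x xs ih =>
    intro k c
    cases k with
    | zero =>
      simp only [pvCombos, List.mem_singleton, List.length_eq_zero_iff]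
      constructor
      · rintro rfl; exact ⟨List.nil_sublist _, rfl⟩
      · rintro ⟨_, rfl⟩; rfl
    | succ k =>
      simp only [pvCombos, List.mem_append, List.mem_map]
      constructor
      · rintro (⟨c', hc', rfl⟩ | h)
        · obtain ⟨hs, hl⟩ := (ih k c').mp hc'
          exact ⟨List.cons_sublist_cons.mpr hs, by simp [hl]⟩
        · obtain ⟨hs, hl⟩ := (ih (k + 1) c).mp h
          exact ⟨hs.cons x, hl⟩
      · rintro ⟨hs, hl⟩
        rcases List.sublist_cons_iff.mp hs with h | ⟨r, rfl, hr⟩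
        · exact Or.inr ((ih (k + 1) c).mpr ⟨h, hl⟩)
        · exact Or.inl ⟨r, (ih k r).mpr ⟨hr, by simpa using hl⟩, rfl⟩

-- A's any-over-combinations condition equals the existence of a non-empty
-- subsequence of rest summing to m
theorem combos_any_iff (rest : List Int) (m : Int) :
    ((PySem.List.pyRange 1 ((rest.length : Int) + 1) 1).flatMap
        (fun k => pvCombos rest k.toNat)).any (fun c => c.sum == m) = true ↔
      ∃ c : List Int, c.Sublist rest ∧ c ≠ [] ∧ c.sum = m := by
  simp only [List.any_eq_true, List.mem_flatMap, beq_iff_eq]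
  constructor
  · rintro ⟨c, ⟨k, hk, hc⟩, hsum⟩
    obtain ⟨hsub, hlen⟩ := (mem_pvCombos rest _ c).mp hc
    have hk1 : 1 ≤ k := (PySem.List.mem_pyRange_one.mp hk).1
    refine ⟨c, hsub, ?_, hsum⟩
    intro hnil
    rw [hnil] at hlen
    simp only [List.length_nil] at hlen
    omega
  · rintro ⟨c, hsub, hne, hsum⟩
    refine ⟨c, ⟨(c.length : Int), ?_, (mem_pvCombos rest _ c).mpr ⟨hsub, by simp⟩⟩, hsum⟩
    rw [PySem.List.mem_pyRange_one]
    have h1 : 1 ≤ c.length := by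
      cases c with
      | nil => exact absurd rfl hne
      | cons _ _ => simp
    have h2 : c.length ≤ rest.length := hsub.length_le
    omega

-- Python's '(mask >> k) & 1' truthiness is testBit
theorem pvBit (mask k : Nat) : ((mask >>> k) &&& 1 = 1) ↔ mask.testBit k := by
  simp [Nat.testBit, Nat.and_one_is_mod]

theorem pvTwoPowBit (s j : Nat) : ((2 ^ s : Nat)).testBit j = true ↔ j = s := by
  constructor
  · intro hb
    by_contra hne
    rw [Nat.testBit_two_pow_of_ne (fun hh => hne hh.symm)] at hb
    exact Bool.false_ne_true hb
  · rintro rfl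
    exact Nat.testBit_two_pow_self

-- the sums reachable after also using x: old sums, old sums plus x, and x itself
def pvExt (S : Int → Prop) (x : Int) : Int → Prop :=
  fun t => S t ∨ (∃ s, S s ∧ t = s + x) ∨ t = x

-- one DP step preserves the bitmask invariant
theorem pvStep_spec (mask : Nat) (base x : Int) (S : Int → Prop)
    (hmask : ∀ j : Nat, mask.testBit j = true ↔ S ((j : Int) + base))
    (hlb : ∀ t, S t → base ≤ t) (hbase : base ≤ 0) :
    (∀ j : Nat, (pvStep mask base x).1.testBit j = true ↔
        pvExt S x ((j : Int) + (pvStep mask base x).2)) ∧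
    (∀ t, pvExt S x t → (pvStep mask base x).2 ≤ t) ∧ (pvStep mask base x).2 ≤ 0 := by
  by_cases hx : 0 ≤ x
  · have h1 : (pvStep mask base x).1
        = (mask ||| (mask <<< x.toNat)) ||| (2 ^ (x - base).toNat) := by
      simp [pvStep, hx, Nat.one_shiftLeft]
    have h2 : (pvStep mask base x).2 = base := by simp [pvStep, hx]
    rw [h1, h2]
    refine ⟨?_, ?_, hbase⟩
    · intro j
      simp only [Nat.testBit_or, Bool.or_eq_true, Nat.testBit_shiftLeft,
        Bool.and_eq_true, decide_eq_true_eq, pvTwoPowBit, pvExt]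
      constructor
      · rintro ((h | ⟨hle, h⟩) | heq)
        · exact Or.inl ((hmask j).mp h)
        · refine Or.inr (Or.inl ⟨((j - x.toNat : Nat) : Int) + base, (hmask _).mp h, ?_⟩)
          have hxj : ((j - x.toNat : Nat) : Int) = (j : Int) - x := by
            have := Int.toNat_of_nonneg hx
            push_cast [Nat.cast_sub hle]
            omega
          rw [hxj]; ring
        · refine Or.inr (Or.inr ?_)
          subst heq
          rw [Int.toNat_of_nonneg (by omega : (0:Int) ≤ x - base)]
          ring
      · rintro (h | ⟨s, hs, heq⟩ | heq)
        · exact Or.inl (Or.inl ((hmask j).mpr h))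
        · have hsb := hlb _ hs
          have hle : x.toNat ≤ j := by omega
          refine Or.inl (Or.inr ⟨hle, (hmask _).mpr ?_⟩)
          have hxj : ((j - x.toNat : Nat) : Int) = (j : Int) - x := by
            have := Int.toNat_of_nonneg hx
            push_cast [Nat.cast_sub hle]
            omega
          rw [hxj]
          have hjs : (j : Int) - x + base = s := by omega
          rw [hjs]; exact hs
        · exact Or.inr (by omega)
    · intro t ht
      rcases ht with ht | ⟨s, hs, heq⟩ | heq
      · exact hlb _ ht
      · have := hlb _ hs; omega
      · omega
  · have hx' : x < 0 := by omega
    have h1 : (pvStep mask base x).1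
        = (mask ||| (mask <<< (-x).toNat)) ||| (2 ^ (-base).toNat) := by
      simp [pvStep, hx, Nat.one_shiftLeft]
    have h2 : (pvStep mask base x).2 = base + x := by simp [pvStep, hx]
    rw [h1, h2]
    refine ⟨?_, ?_, by omega⟩
    · intro j
      simp only [Nat.testBit_or, Bool.or_eq_true, Nat.testBit_shiftLeft,
        Bool.and_eq_true, decide_eq_true_eq, pvTwoPowBit, pvExt]
      constructor
      · rintro ((h | ⟨hle, h⟩) | heq)
        · exact Or.inr (Or.inl ⟨(j : Int) + base, (hmask j).mp h, by ring⟩)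
        · refine Or.inl ?_
          have hxj : ((j - (-x).toNat : Nat) : Int) = (j : Int) + x := by
            have := Int.toNat_of_nonneg (by omega : (0:Int) ≤ -x)
            push_cast [Nat.cast_sub hle]
            omega
          have h' := (hmask _).mp h
          rw [hxj] at h'
          have he : (j : Int) + (base + x) = (j : Int) + x + base := by ring
          rw [he]; exact h'
        · refine Or.inr (Or.inr ?_)
          subst heq
          rw [Int.toNat_of_nonneg (by omega : (0:Int) ≤ -base)]
          ring
      · rintro (h | ⟨s, hs, heq⟩ | heq)
        · have hsb := hlb _ h
          have hle : (-x).toNat ≤ j := by omega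
          refine Or.inl (Or.inr ⟨hle, (hmask _).mpr ?_⟩)
          have hxj : ((j - (-x).toNat : Nat) : Int) = (j : Int) + x := by
            have := Int.toNat_of_nonneg (by omega : (0:Int) ≤ -x)
            push_cast [Nat.cast_sub hle]
            omega
          rw [hxj]
          have he : (j : Int) + x + base = (j : Int) + (base + x) := by ring
          rw [he]; exact h
        · refine Or.inl (Or.inl ((hmask j).mpr ?_))
          have he : (j : Int) + base = s := by omega
          rw [he]; exact hs
        · exact Or.inr (by omega)
    · intro t ht
      rcases ht with ht | ⟨s, hs, heq⟩ | heq
      · have := hlb _ ht; omega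
      · have := hlb _ hs; omega
      · omega

-- pvLoop only ever returns "true" or "false"
theorem pvLoop_tf (m : Int) : ∀ (xs : List Int) (mask : Nat) (base : Int),
    pvLoop m xs mask base = "true" ∨ pvLoop m xs mask base = "false" := by
  intro xs
  induction xs with
  | nil => intro mask base; exact Or.inr rfl
  | cons x xs ih =>
    intro mask base
    rw [pvLoop]
    split
    · exact Or.inl rfl
    · exact ih _ _

-- the loop's invariant: if the mask's bits describe exactly the sums in S (shifted by
-- base), base is a lower bound of S and base ≤ 0, then the loop says "true" exactly
-- when some prefix of xs extends S (or the empty sum) to reach m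
theorem pvLoop_spec (m : Int) : ∀ (xs : List Int) (mask : Nat) (base : Int) (S : Int → Prop),
    (∀ j : Nat, mask.testBit j = true ↔ S ((j : Int) + base)) →
    (∀ t, S t → base ≤ t) → base ≤ 0 →
    (pvLoop m xs mask base = "true" ↔
      (xs ≠ [] ∧ (S m ∨ ∃ s c, (s = 0 ∨ S s) ∧ c.Sublist xs ∧ c ≠ [] ∧ m = s + c.sum))) := by
  intro xs
  induction xs with
  | nil =>
    intro mask base S hmask hlb hbase
    simp [pvLoop]
  | cons x xs ih =>
    intro mask base S hmask hlb hbase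
    obtain ⟨hmask', hlb', hbase'⟩ := pvStep_spec mask base x S hmask hlb hbase
    have hcond : (m ≥ (pvStep mask base x).2 ∧
        (((pvStep mask base x).1 >>> (m - (pvStep mask base x).2).toNat) &&& 1) = 1)
        ↔ pvExt S x m := by
      constructor
      · rintro ⟨hge, hbit⟩
        have hh := (hmask' _).mp ((pvBit _ _).mp hbit)
        rwa [Int.toNat_of_nonneg (by omega), sub_add_cancel] at hh
      · intro hS'm
        have hge : (pvStep mask base x).2 ≤ m := hlb' _ hS'm
        refine ⟨hge, (pvBit _ _).mpr ((hmask' _).mpr ?_)⟩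
        rwa [Int.toNat_of_nonneg (by omega), sub_add_cancel]
    rw [pvLoop]
    by_cases hc : (m ≥ (pvStep mask base x).2 ∧
        (((pvStep mask base x).1 >>> (m - (pvStep mask base x).2).toNat) &&& 1) = 1)
    · rw [if_pos hc]
      refine iff_of_true rfl ⟨by simp, ?_⟩
      rcases hcond.mp hc with h | ⟨s, hs, heq⟩ | heq
      · exact Or.inl h
      · exact Or.inr ⟨s, [x], Or.inr hs, by simp, by simp, by rw [heq]; simp⟩
      · exact Or.inr ⟨0, [x], Or.inl rfl, by simp, by simp, by rw [heq]; simp⟩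
    · rw [if_neg hc]
      have hnS'm : ¬ pvExt S x m := fun h => hc (hcond.mpr h)
      rw [ih (pvStep mask base x).1 (pvStep mask base x).2 (pvExt S x) hmask' hlb' hbase']
      constructor
      · rintro ⟨hxs, h | ⟨s, c, hsS, hsub, hne, rfl⟩⟩
        · exact absurd h hnS'm
        · refine ⟨by simp, Or.inr ?_⟩
          rcases hsS with rfl | hsS
          · exact ⟨0, c, Or.inl rfl, hsub.cons x, hne, rfl⟩
          · rcases hsS with hs | ⟨s₀, hs₀, heq⟩ | heq
            · exact ⟨s, c, Or.inr hs, hsub.cons x, hne, rfl⟩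
            · exact ⟨s₀, x :: c, Or.inr hs₀, List.cons_sublist_cons.mpr hsub,
                by simp, by rw [heq, List.sum_cons]; ring⟩
            · exact ⟨0, x :: c, Or.inl rfl, List.cons_sublist_cons.mpr hsub,
                by simp, by rw [heq, List.sum_cons]; ring⟩
      · rintro ⟨-, h | ⟨s, c, hsS, hsub, hne, rfl⟩⟩
        · exact absurd (Or.inl h) hnS'm
        · rcases List.sublist_cons_iff.mp hsub with hcx | ⟨r, rfl, hr⟩
          · have hxs : xs ≠ [] := by
              intro h0; rw [h0] at hcx
              exact hne (List.sublist_nil.mp hcx)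
            refine ⟨hxs, Or.inr ⟨s, c, ?_, hcx, hne, rfl⟩⟩
            rcases hsS with rfl | hsS
            · exact Or.inl rfl
            · exact Or.inr (Or.inl hsS)
          · cases r with
            | nil =>
              exfalso
              apply hnS'm
              rcases hsS with rfl | hsS
              · exact Or.inr (Or.inr (by simp))
              · exact Or.inr (Or.inl ⟨s, hsS, by simp⟩)
            | cons y r' =>
              have hxs : xs ≠ [] := by
                intro h0; rw [h0] at hr
                exact absurd (List.sublist_nil.mp hr) (by simp)
              refine ⟨hxs, Or.inr ⟨s + x, y :: r', ?_, hr, by simp, by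
                rw [List.sum_cons, List.sum_cons]; ring⟩⟩
              rcases hsS with rfl | hsS
              · exact Or.inr (Or.inr (Or.inr (by ring)))
              · exact Or.inr (Or.inr (Or.inl ⟨s, hsS, rfl⟩))

-- the loop from the empty mask decides 'some non-empty subsequence sums to m'
theorem pvLoop_zero_iff (m : Int) (xs : List Int) :
    pvLoop m xs 0 0 = "true" ↔ ∃ c : List Int, c.Sublist xs ∧ c ≠ [] ∧ c.sum = m := by
  rw [pvLoop_spec m xs 0 0 (fun _ => False)
    (by intro j; simp [Nat.zero_testBit]) (by intro t h; exact h.elim) le_rfl]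
  constructor
  · rintro ⟨-, h | ⟨s, c, hs, hsub, hne, rfl⟩⟩
    · exact h.elim
    · rcases hs with rfl | hs
      · exact ⟨c, hsub, hne, by simp⟩
      · exact hs.elim
  · rintro ⟨c, hsub, hne, rfl⟩
    have hxs : xs ≠ [] := by
      intro h0; rw [h0] at hsub
      exact hne (List.sublist_nil.mp hsub)
    exact ⟨hxs, Or.inr ⟨0, c, Or.inl rfl, hsub, hne, by simp⟩⟩

-- the existence of a summing subsequence is invariant under permutation
theorem exists_sublist_sum_of_perm {l l' : List Int} (hp : l.Perm l') (m : Int)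
    (h : ∃ c : List Int, c.Sublist l ∧ c ≠ [] ∧ c.sum = m) :
    ∃ c : List Int, c.Sublist l' ∧ c ≠ [] ∧ c.sum = m := by
  obtain ⟨c, hsub, hne, hsum⟩ := h
  obtain ⟨c', hc'p, hc'sub⟩ := hsub.subperm.trans hp.subperm
  refine ⟨c', hc'sub, ?_, by rw [hc'p.sum_eq, hsum]⟩
  intro h0
  rw [h0] at hc'p
  exact hne (List.Perm.eq_nil hc'p.symm)

-- A's condition and B's loop agree on every rest list
theorem cond_eq_loop (rest : List Int) (m : Int) :
    (if ((PySem.List.pyRange 1 ((rest.length : Int) + 1) 1).flatMap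
          (fun k => pvCombos rest k.toNat)).any (fun c => c.sum == m)
     then "true" else "false")
      = pvLoop m (PySem.List.sorted rest (fun x => |x|) false) 0 0 := by
  have hperm : (PySem.List.sorted rest (fun x => |x|) false).Perm rest :=
    PySem.List.sorted_perm rest (fun x => |x|) false
  have hiff : ((PySem.List.pyRange 1 ((rest.length : Int) + 1) 1).flatMap
        (fun k => pvCombos rest k.toNat)).any (fun c => c.sum == m) = true ↔
      pvLoop m (PySem.List.sorted rest (fun x => |x|) false) 0 0 = "true" := by
    rw [combos_any_iff, pvLoop_zero_iff]
    exact ⟨exists_sublist_sum_of_perm hperm.symm m, exists_sublist_sum_of_perm hperm m⟩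
  by_cases h : ((PySem.List.pyRange 1 ((rest.length : Int) + 1) 1).flatMap
        (fun k => pvCombos rest k.toNat)).any (fun c => c.sum == m) = true
  · rw [if_pos h, (hiff.mp h).symm]
  · rw [if_neg h]
    rcases pvLoop_tf m (PySem.List.sorted rest (fun x => |x|) false) 0 0 with ht | hf
    · exact absurd (hiff.mpr ht) h
    · exact hf.symm

-- ===== VERDICT (by name: the statement is the Claim_ definition above) =====
theorem ArrayAddition_spec : Claim_equal_ArrayAddition := by
  intro arr _ _
  unfold Spec_ArrayAddition ArrayAddition ArrayAddition_alt
  cases hmax : PySem.List.max? arr (fun y => y) with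
  | none => rfl
  | some m =>
    dsimp only
    cases hidx : PySem.List.index? arr m with
    | none => exact cond_eq_loop arr m
    | some i =>
      dsimp only
      exact cond_eq_loop
        (match PySem.List.pop? arr (i : Int) with | none => arr | some (_, r) => r) m
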